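-- pv_equiv track=rewrite | github.com/Kingsdom005/Judge2024OS | judge2.py | find_targets
-- ===== SOURCE A (Python) =====
-- def find_targets(source, targets):
--     # 拆分 source 为多行
--     lines = source.splitlines()
--
--     # 结果列表
--     res = []
--
--     # 遍历目标字符串
--     for target in targets:
--         found = False
--         # 遍历每一行，检测是否包含目标字符串
--         for i, line in enumerate(lines, start=1):  # 行号从1开始
--             if target in line:
--                 res.append(i)  # 保存行号
--                 found = True
--                 break
--         if not found:
--             res.append(-1)  # 没有找到该目标时返回 -1
--
--     return res
-- ===== SOURCE B (Python) =====
-- def find_targets(source, targets):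
--     # line-major single pass: record the first line number for each target in a dict
--     first = {}
--     for i, line in enumerate(source.splitlines(), start=1):
--         for t in targets:
--             if t not in first and t in line:
--                 first[t] = i
--     return [first.get(t, -1) for t in targets]
-- ===== Notes on version B (the rewrite author's own statement) =====
-- stated objective: alternative
-- what changed: target-major scan with per-target break replaced by a line-major single sweep over the lines that records each target's first hit in a dict, then one lookup pass over targets
import Mathlib
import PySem

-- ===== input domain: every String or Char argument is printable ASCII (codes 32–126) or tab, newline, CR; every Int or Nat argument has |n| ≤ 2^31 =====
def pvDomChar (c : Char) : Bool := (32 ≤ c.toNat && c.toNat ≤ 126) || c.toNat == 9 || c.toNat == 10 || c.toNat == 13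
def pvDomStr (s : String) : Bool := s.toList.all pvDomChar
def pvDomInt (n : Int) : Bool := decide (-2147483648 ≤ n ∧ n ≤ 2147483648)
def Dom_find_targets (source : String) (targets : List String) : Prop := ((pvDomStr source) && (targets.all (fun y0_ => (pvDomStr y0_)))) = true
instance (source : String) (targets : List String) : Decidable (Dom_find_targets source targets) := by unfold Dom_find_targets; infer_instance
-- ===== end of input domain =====

-- B replaces A's target-major scan (inner loop over lines with break per target) by one
-- line-major sweep recording each target's first hit in a dict; alternative structure, same cost.

-- ===== PORT A =====
-- inner loop of A: scan enumerated lines, return the first line number containing target, else -1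
def pvAScan (target : String) : List (Int × String) → Int
  | [] => -1
  | (i, line) :: rest => if PySem.Str.isIn target line then i else pvAScan target rest

def find_targets (source : String) (targets : List String) : List Int :=
  let lines := PySem.Str.splitlines source
  targets.foldl (fun res target => res ++ [pvAScan target (PySem.List.enumerate lines 1)]) []

-- ===== PORT B =====
-- inner loop of B over targets for one line
def pvBStep (i : Int) (line : String) (first : PySem.Dict String Int) (targets : List String) : PySem.Dict String Int :=
  targets.foldl (fun first t =>
    if !(first.contains t) && PySem.Str.isIn t line then first.insert t i else first) first

def find_targets_alt (source : String) (targets : List String) : List Int :=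
  let first := (PySem.List.enumerate (PySem.Str.splitlines source) 1).foldl
    (fun first p => pvBStep p.1 p.2 first targets) PySem.Dict.empty
  targets.map (fun t => first.getD t (-1))

-- ===== PRECONDITION & SPEC =====
def Spec_find_targets (source : String) (targets : List String) (out : List Int) : Prop := out = find_targets_alt source targets
instance (source : String) (targets : List String) (out : List Int) : Decidable (Spec_find_targets source targets out) := by unfold Spec_find_targets; infer_instance

-- ===== CLAIM (what is proved, stated in full; the proofs are below) =====
def Claim_equal_find_targets : Prop := ∀ (source : String) (targets : List String), Dom_find_targets source targets → Spec_find_targets source targets (find_targets source targets)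

-- ===== LEMMAS AND PROOFS =====

-- optional-valued version of A's inner scan, for the dict invariant
def pvAScan? (target : String) : List (Int × String) → Option Int
  | [] => none
  | (i, line) :: rest => if PySem.Str.isIn target line then some i else pvAScan? target rest

theorem pvAScan_eq (t : String) (E : List (Int × String)) :
    pvAScan t E = (pvAScan? t E).getD (-1) := by
  induction E with
  | nil => rfl
  | cons p rest ih =>
      obtain ⟨i, l⟩ := p
      simp only [pvAScan, pvAScan?]
      split_ifs <;> simp [ih]

-- a step over targets does not touch keys outside targets
theorem pvBStep_get?_not_mem (i : Int) (line : String) (targets : List String)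
    (d : PySem.Dict String Int) (t : String) (ht : t ∉ targets) :
    (pvBStep i line d targets).get? t = d.get? t := by
  induction targets generalizing d with
  | nil => rfl
  | cons t' rest ih =>
      have h1 : t ∉ rest := fun h => ht (List.mem_cons_of_mem _ h)
      have h2 : t ≠ t' := fun h => ht (h ▸ List.mem_cons_self)
      show (pvBStep i line (if (!(d.contains t') && PySem.Str.isIn t' line) = true then d.insert t' i else d) rest).get? t = d.get? t
      rw [ih _ h1]
      split_ifs with h
      · exact PySem.Dict.get?_insert_of_ne d i h2
      · rfl

-- one target-step at the target's own key
theorem pvStep1_get?_self (i : Int) (line : String) (d : PySem.Dict String Int) (t : String) :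
    (if !(d.contains t) && PySem.Str.isIn t line then d.insert t i else d).get? t =
      if d.get? t = none ∧ PySem.Str.isIn t line then some i else d.get? t := by
  by_cases hc : d.contains t
  · have hg : d.get? t ≠ none := by simp [PySem.Dict.get?_eq_none_iff_contains, hc]
    simp [hc, hg]
  · have hg : d.get? t = none := by simp [PySem.Dict.get?_eq_none_iff_contains, hc]
    by_cases hin : PySem.Chars.isIn t.toList line.toList
    · simp [hc, hin, hg, PySem.Dict.get?_insert_self]
    · simp [hc, hin, hg]

theorem pvBStep_get?_mem (i : Int) (line : String) (targets : List String)
    (d : PySem.Dict String Int) (t : String) (ht : t ∈ targets) :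
    (pvBStep i line d targets).get? t =
      if d.get? t = none ∧ PySem.Str.isIn t line then some i else d.get? t := by
  induction targets generalizing d with
  | nil => cases ht
  | cons t' rest ih =>
      show (pvBStep i line (if !(d.contains t') && PySem.Str.isIn t' line then d.insert t' i else d) rest).get? t = _
      by_cases hmem : t ∈ rest
      · rw [ih _ hmem]
        by_cases hte : t = t'
        · subst hte
          rw [pvStep1_get?_self]
          cases hg : d.get? t with
          | none => by_cases hin : PySem.Chars.isIn t.toList line.toList <;> simp [hin]
          | some v => simp
        · have heq : (if !(d.contains t') && PySem.Str.isIn t' line then d.insert t' i else d).get? t = d.get? t := by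
            split_ifs with h
            · exact PySem.Dict.get?_insert_of_ne d i hte
            · rfl
          rw [heq]
      · have hte : t = t' := by
          rcases List.mem_cons.mp ht with h | h
          · exact h
          · exact absurd h hmem
        subst hte
        rw [pvBStep_get?_not_mem i line rest _ t hmem, pvStep1_get?_self]

-- the outer sweep's invariant: for t ∈ targets, the dict entry is the first existing value, else A's first hit in E
theorem pvOuter_get? (targets : List String) (E : List (Int × String))
    (d : PySem.Dict String Int) (t : String) (ht : t ∈ targets) :
    (E.foldl (fun first p => pvBStep p.1 p.2 first targets) d).get? t
      = (d.get? t).or (pvAScan? t E) := by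
  induction E generalizing d with
  | nil => simp [pvAScan?]
  | cons p rest ih =>
      obtain ⟨i, l⟩ := p
      show (rest.foldl _ (pvBStep i l d targets)).get? t = _
      rw [ih]
      rw [pvBStep_get?_mem i l targets d t ht]
      cases hg : d.get? t with
      | some v => simp
      | none =>
          by_cases hin : PySem.Chars.isIn t.toList l.toList
          · simp [hin, pvAScan?]
          · simp [hin, pvAScan?]

-- ===== VERDICT (by name: the statement is the Claim_ definition above) =====
theorem find_targets_spec : Claim_equal_find_targets := by
  intro source targets _
  show targets.foldl (fun res target => res ++ [pvAScan target (PySem.List.enumerate (PySem.Str.splitlines source) 1)]) [] =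
    targets.map (fun t => ((PySem.List.enumerate (PySem.Str.splitlines source) 1).foldl
      (fun first p => pvBStep p.1 p.2 first targets) PySem.Dict.empty).getD t (-1))
  rw [PySem.List.foldl_append_singleton_eq_map]
  refine List.map_congr_left ?_
  intro t ht
  rw [pvAScan_eq]
  have hD : ∀ (X : PySem.Dict String Int), X.getD t (-1) = (X.get? t).getD (-1) := fun _ => rfl
  rw [hD, pvOuter_get? targets _ PySem.Dict.empty t ht]
  rfl
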